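-- pv_equiv track=rewrite | github.com/zespere/vibeview | backend/app/canvas_service.py | _tag_zone_origin
-- ===== SOURCE A (Python) =====
-- def _tag_zone_origin(tags: list[str]) -> tuple[int, int]:
--     tag_set = {tag.strip().lower() for tag in tags if tag.strip()}
--     if {"ui-surface", "screen", "layout", "shell"} & tag_set:
--         return (120, 120)
--     if {"workflow", "feature", "domain"} & tag_set:
--         return (460, 160)
--     if {"state", "entity", "policy"} & tag_set:
--         return (820, 140)
--     if {"boundary", "integration", "data", "persistence"} & tag_set:
--         return (1120, 220)
--     return (420, 420)
-- ===== SOURCE B (Python) =====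
-- _PRIORITY = {
--     "ui-surface": 0, "screen": 0, "layout": 0, "shell": 0,
--     "workflow": 1, "feature": 1, "domain": 1,
--     "state": 2, "entity": 2, "policy": 2,
--     "boundary": 3, "integration": 3, "data": 3, "persistence": 3,
-- }
-- _COORDS = [(120, 120), (460, 160), (820, 140), (1120, 220)]
--
--
-- def _tag_zone_origin(tags: list[str]) -> tuple[int, int]:
--     best = None
--     for tag in tags:
--         idx = _PRIORITY.get(tag.strip().lower())
--         if idx is not None and (best is None or idx < best):
--             best = idx
--     return _COORDS[best] if best is not None else (420, 420)
-- ===== Notes on version B (the rewrite author's own statement) =====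
-- stated objective: idiomatic
-- what changed: Replaced the four group-major set intersections over a built tag set with a precomputed keyword-to-priority-index dict plus a coordinate table, and a single tag-major pass keeping the minimum matched index.
import Mathlib
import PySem

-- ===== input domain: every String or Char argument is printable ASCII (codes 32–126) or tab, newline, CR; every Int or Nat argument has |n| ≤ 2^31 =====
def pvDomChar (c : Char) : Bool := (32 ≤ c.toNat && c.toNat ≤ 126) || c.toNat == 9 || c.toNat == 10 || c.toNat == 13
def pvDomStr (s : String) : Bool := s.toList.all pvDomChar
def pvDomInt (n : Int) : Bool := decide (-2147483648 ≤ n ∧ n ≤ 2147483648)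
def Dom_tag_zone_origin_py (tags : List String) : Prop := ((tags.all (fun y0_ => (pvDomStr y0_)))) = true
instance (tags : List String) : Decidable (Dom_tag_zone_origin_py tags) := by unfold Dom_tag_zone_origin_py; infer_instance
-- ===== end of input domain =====

-- B replaces A's four group-major set intersections with a keyword→priority dict and one min-scan over the tags (idiomatic table-driven form).

-- ===== PORT A =====
-- the four keyword groups, as the Python set literals
def pvG0 : List String := ["ui-surface", "screen", "layout", "shell"]
def pvG1 : List String := ["workflow", "feature", "domain"]
def pvG2 : List String := ["state", "entity", "policy"]
def pvG3 : List String := ["boundary", "integration", "data", "persistence"]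

def tag_zone_origin_py (tags : List String) : Int × Int :=
  let tag_set : PySem.Set String :=
    PySem.Set.ofList ((tags.filter (fun t => PySem.Str.strip t != "")).map
      (fun t => PySem.Str.lower (PySem.Str.strip t)))
  if PySem.Set.inter (PySem.Set.ofList pvG0) tag_set ≠ [] then (120, 120)
  else if PySem.Set.inter (PySem.Set.ofList pvG1) tag_set ≠ [] then (460, 160)
  else if PySem.Set.inter (PySem.Set.ofList pvG2) tag_set ≠ [] then (820, 140)
  else if PySem.Set.inter (PySem.Set.ofList pvG3) tag_set ≠ [] then (1120, 220)
  else (420, 420)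

-- ===== PORT B =====
def pvPriority : PySem.Dict String Nat := PySem.Dict.mk
  [("ui-surface", 0), ("screen", 0), ("layout", 0), ("shell", 0),
   ("workflow", 1), ("feature", 1), ("domain", 1),
   ("state", 2), ("entity", 2), ("policy", 2),
   ("boundary", 3), ("integration", 3), ("data", 3), ("persistence", 3)]

def pvCoords : List (Int × Int) := [(120, 120), (460, 160), (820, 140), (1120, 220)]

def tag_zone_origin_py_alt (tags : List String) : Int × Int :=
  let best := tags.foldl (fun best tag =>
      match PySem.Dict.get? pvPriority (PySem.Str.lower (PySem.Str.strip tag)) with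
      | none => best
      | some idx =>
        match best with
        | none => some idx
        | some b => if idx < b then some idx else some b) (none : Option Nat)
  match best with
  | some b => pvCoords.getD b (420, 420)
  | none => (420, 420)

-- ===== PRECONDITION & SPEC =====
def Spec_tag_zone_origin_py (tags : List String) (out : Int × Int) : Prop := out = tag_zone_origin_py_alt tags
instance (tags : List String) (out : Int × Int) : Decidable (Spec_tag_zone_origin_py tags out) := by unfold Spec_tag_zone_origin_py; infer_instance

-- ===== CLAIM (what is proved, stated in full; the proofs are below) =====
def Claim_equal_tag_zone_origin_py : Prop := ∀ (tags : List String), Dom_tag_zone_origin_py tags → Spec_tag_zone_origin_py tags (tag_zone_origin_py tags)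

-- ===== LEMMAS AND PROOFS =====

-- normalization and the per-tag lookup
def pvNorm (t : String) : String := PySem.Str.lower (PySem.Str.strip t)
def pvF (t : String) : Option Nat := PySem.Dict.get? pvPriority (pvNorm t)

-- the dict, characterised by the four groups
lemma get?_pvPriority (k : String) :
    PySem.Dict.get? pvPriority k =
      (if k ∈ pvG0 then some 0 else if k ∈ pvG1 then some 1
       else if k ∈ pvG2 then some 2 else if k ∈ pvG3 then some 3 else none) := by
  by_cases h0 : k ∈ pvG0
  · simp only [pvG0, List.mem_cons, List.not_mem_nil, or_false] at h0
    rcases h0 with rfl | rfl | rfl | rfl <;> decide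
  by_cases h1 : k ∈ pvG1
  · simp only [pvG1, List.mem_cons, List.not_mem_nil, or_false] at h1
    rcases h1 with rfl | rfl | rfl <;> decide
  by_cases h2 : k ∈ pvG2
  · simp only [pvG2, List.mem_cons, List.not_mem_nil, or_false] at h2
    rcases h2 with rfl | rfl | rfl <;> decide
  by_cases h3 : k ∈ pvG3
  · simp only [pvG3, List.mem_cons, List.not_mem_nil, or_false] at h3
    rcases h3 with rfl | rfl | rfl | rfl <;> decide
  rw [if_neg h0, if_neg h1, if_neg h2, if_neg h3]
  simp only [pvG0, pvG1, pvG2, pvG3, List.mem_cons, List.not_mem_nil, or_false, not_or]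
    at h0 h1 h2 h3
  simp only [pvPriority, PySem.Dict.get?_mk_cons, beq_iff_eq]
  obtain ⟨a1, a2, a3, a4⟩ := h0
  obtain ⟨b1, b2, b3⟩ := h1
  obtain ⟨c1, c2, c3⟩ := h2
  obtain ⟨d1, d2, d3, d4⟩ := h3
  rw [if_neg (fun h => a1 h.symm), if_neg (fun h => a2 h.symm),
    if_neg (fun h => a3 h.symm), if_neg (fun h => a4 h.symm),
    if_neg (fun h => b1 h.symm), if_neg (fun h => b2 h.symm),
    if_neg (fun h => b3 h.symm), if_neg (fun h => c1 h.symm),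
    if_neg (fun h => c2 h.symm), if_neg (fun h => c3 h.symm),
    if_neg (fun h => d1 h.symm), if_neg (fun h => d2 h.symm),
    if_neg (fun h => d3 h.symm), if_neg (fun h => d4 h.symm)]
  rfl

-- pvF returns only group indices 0..3
lemma pvF_lt_four {t : String} {i : Nat} (h : pvF t = some i) : i < 4 := by
  rw [pvF, get?_pvPriority] at h
  split_ifs at h <;> simp_all <;> omega

lemma strip_empty_norm {t : String} (h : PySem.Str.strip t = "") : pvNorm t = "" := by
  rw [pvNorm, h]; decide

-- the four groups are pairwise disjoint and do not contain ""
lemma mem_g1_not_g0 {k : String} (h : k ∈ pvG1) : k ∉ pvG0 := by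
  fin_cases h <;> decide
lemma mem_g2_not_g01 {k : String} (h : k ∈ pvG2) : k ∉ pvG0 ∧ k ∉ pvG1 := by
  fin_cases h <;> decide
lemma mem_g3_not_g012 {k : String} (h : k ∈ pvG3) : k ∉ pvG0 ∧ k ∉ pvG1 ∧ k ∉ pvG2 := by
  fin_cases h <;> decide

lemma pvF_eq_zero_iff (t : String) : pvF t = some 0 ↔ pvNorm t ∈ pvG0 := by
  rw [pvF, get?_pvPriority]
  split_ifs <;> simp_all

lemma pvF_eq_one_iff (t : String) : pvF t = some 1 ↔ pvNorm t ∈ pvG1 := by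
  rw [pvF, get?_pvPriority]
  split_ifs with h0 <;> simp_all
  exact fun h => mem_g1_not_g0 h h0

lemma pvF_eq_two_iff (t : String) : pvF t = some 2 ↔ pvNorm t ∈ pvG2 := by
  rw [pvF, get?_pvPriority]
  split_ifs with h0 h1 <;> simp_all
  · exact fun h => (mem_g2_not_g01 h).1 h0
  · exact fun h => (mem_g2_not_g01 h).2 h1

lemma pvF_eq_three_iff (t : String) : pvF t = some 3 ↔ pvNorm t ∈ pvG3 := by
  rw [pvF, get?_pvPriority]
  split_ifs with h0 h1 h2 <;> simp_all
  · exact fun h => (mem_g3_not_g012 h).1 h0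
  · exact fun h => (mem_g3_not_g012 h).2.1 h1
  · exact fun h => (mem_g3_not_g012 h).2.2 h2

-- A's intersection test, in terms of the normalized tags
lemma inter_ne_iff (tags g : List String) (hg : "" ∉ g) :
    PySem.Set.inter (PySem.Set.ofList g)
      (PySem.Set.ofList ((tags.filter (fun t => PySem.Str.strip t != "")).map
        (fun t => PySem.Str.lower (PySem.Str.strip t)))) ≠ [] ↔
      ∃ t ∈ tags, pvNorm t ∈ g := by
  rw [Ne, List.eq_nil_iff_forall_not_mem]
  push Not
  constructor
  · rintro ⟨k, hk⟩
    rw [PySem.Set.mem_inter, PySem.Set.mem_ofList, PySem.Set.mem_ofList, List.mem_map] at hk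
    obtain ⟨hkg, t, ht, rfl⟩ := hk
    exact ⟨t, (List.mem_filter.mp ht).1, hkg⟩
  · rintro ⟨t, ht, hmem⟩
    refine ⟨pvNorm t, ?_⟩
    rw [PySem.Set.mem_inter, PySem.Set.mem_ofList, PySem.Set.mem_ofList, List.mem_map]
    refine ⟨hmem, t, List.mem_filter.mpr ⟨ht, ?_⟩, rfl⟩
    simp only [bne_iff_ne, ne_eq]
    intro hstrip
    exact hg (strip_empty_norm hstrip ▸ hmem)

-- B's fold computes the minimum matched index
lemma foldl_step_some (tags : List String) (a : Nat) :
    tags.foldl (fun best tag =>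
      match PySem.Dict.get? pvPriority (PySem.Str.lower (PySem.Str.strip tag)) with
      | none => best
      | some idx =>
        match best with
        | none => some idx
        | some b => if idx < b then some idx else some b) (some a)
    = some ((tags.filterMap pvF).foldl min a) := by
  induction tags generalizing a with
  | nil => rfl
  | cons t ts ih =>
    simp only [List.foldl_cons, List.filterMap_cons]
    have : PySem.Dict.get? pvPriority (PySem.Str.lower (PySem.Str.strip t)) = pvF t := rfl
    rw [this]
    cases hf : pvF t with
    | none => exact ih a
    | some i =>
      have hmin : (if i < a then some i else some a) = some (min a i) := by
        split_ifs <;> simp <;> omega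
      dsimp only
      rw [hmin, ih (min a i), List.foldl_cons]

lemma foldl_step_none (tags : List String) :
    tags.foldl (fun best tag =>
      match PySem.Dict.get? pvPriority (PySem.Str.lower (PySem.Str.strip tag)) with
      | none => best
      | some idx =>
        match best with
        | none => some idx
        | some b => if idx < b then some idx else some b) none
    = (tags.filterMap pvF).min? := by
  induction tags with
  | nil => rfl
  | cons t ts ih =>
    simp only [List.foldl_cons, List.filterMap_cons]
    have : PySem.Dict.get? pvPriority (PySem.Str.lower (PySem.Str.strip t)) = pvF t := rfl
    rw [this]
    cases hf : pvF t with
    | none => exact ih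
    | some i =>
      dsimp only
      rw [foldl_step_some, List.min?_cons']

theorem tag_zone_origin_py_spec : Claim_equal_tag_zone_origin_py := by
  intro tags _
  unfold Spec_tag_zone_origin_py tag_zone_origin_py tag_zone_origin_py_alt
  rw [foldl_step_none]
  have hG0 := inter_ne_iff tags pvG0 (by decide)
  have hG1 := inter_ne_iff tags pvG1 (by decide)
  have hG2 := inter_ne_iff tags pvG2 (by decide)
  have hG3 := inter_ne_iff tags pvG3 (by decide)
  have m0 : (∃ t ∈ tags, pvNorm t ∈ pvG0) ↔ 0 ∈ tags.filterMap pvF := by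
    simp only [List.mem_filterMap, pvF_eq_zero_iff]
  have m1 : (∃ t ∈ tags, pvNorm t ∈ pvG1) ↔ 1 ∈ tags.filterMap pvF := by
    simp only [List.mem_filterMap, pvF_eq_one_iff]
  have m2 : (∃ t ∈ tags, pvNorm t ∈ pvG2) ↔ 2 ∈ tags.filterMap pvF := by
    simp only [List.mem_filterMap, pvF_eq_two_iff]
  have m3 : (∃ t ∈ tags, pvNorm t ∈ pvG3) ↔ 3 ∈ tags.filterMap pvF := by
    simp only [List.mem_filterMap, pvF_eq_three_iff]
  cases hm : (tags.filterMap pvF).min? with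
  | none =>
    have hnil : tags.filterMap pvF = [] := List.min?_eq_none_iff.mp hm
    rw [if_neg, if_neg, if_neg, if_neg] <;> simp_all
  | some m =>
    obtain ⟨hmem, hle⟩ := List.min?_eq_some_iff.mp hm
    have hm4 : m < 4 := by
      obtain ⟨t, _, hf⟩ := List.mem_filterMap.mp hmem
      exact pvF_lt_four hf
    interval_cases m
    · rw [if_pos (hG0.mpr (m0.mpr hmem))]; rfl
    · have h0 : ¬(0 ∈ tags.filterMap pvF) := fun h => by have := hle 0 h; omega
      rw [if_neg (fun h => h0 (m0.mp (hG0.mp h))), if_pos (hG1.mpr (m1.mpr hmem))]; rfl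
    · have h0 : ¬(0 ∈ tags.filterMap pvF) := fun h => by have := hle 0 h; omega
      have h1 : ¬(1 ∈ tags.filterMap pvF) := fun h => by have := hle 1 h; omega
      rw [if_neg (fun h => h0 (m0.mp (hG0.mp h))), if_neg (fun h => h1 (m1.mp (hG1.mp h))),
        if_pos (hG2.mpr (m2.mpr hmem))]; rfl
    · have h0 : ¬(0 ∈ tags.filterMap pvF) := fun h => by have := hle 0 h; omega
      have h1 : ¬(1 ∈ tags.filterMap pvF) := fun h => by have := hle 1 h; omega
      have h2 : ¬(2 ∈ tags.filterMap pvF) := fun h => by have := hle 2 h; omega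
      rw [if_neg (fun h => h0 (m0.mp (hG0.mp h))), if_neg (fun h => h1 (m1.mp (hG1.mp h))),
        if_neg (fun h => h2 (m2.mp (hG2.mp h))), if_pos (hG3.mpr (m3.mpr hmem))]; rfl
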